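-- pv_equiv track=rewrite | github.com/paul-cruz/Python | MostRequestedRoom/main.py | solution
-- ===== SOURCE A (Python) =====
-- def solution(A):
--     reservations = {}
--     for reserv in A:
--         if reserv in reservations.keys():
--             reservations[reserv] += 1
--         else:
--             reservations[reserv] = 1
--     max_number_of_reservations = max(reservations.values())
--
--     list_of_rooms = []
--     for room in reservations:
--         if reservations[room] == max_number_of_reservations:
--             list_of_rooms.append(room[1:])
--
--     list_of_rooms.sort()
--
--     return list_of_rooms[0]
-- ===== SOURCE B (Python) =====
-- def solution(A):
--     counts = {}
--     best_count = 0
--     best_suffix = None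
--     for r in A:
--         c = counts.get(r, 0) + 1
--         counts[r] = c
--         s = r[1:]
--         if c > best_count or (c == best_count and s < best_suffix):
--             best_count = c
--             best_suffix = s
--     return best_suffix
-- ===== Notes on version B (the rewrite author's own statement) =====
-- stated objective: alternative
-- what changed: Replaces A's count-then-select design (count dict, then max over values, then filter-collect suffixes, then sort and take first) by a single online pass that maintains a running champion (best count, lexicographically smallest suffix at that count) while counting; counts only grow, so the running champion is correct and the three post-passes disappear.
-- outside the precondition, e.g. on solution([]): A raises ValueError, B returns None
import Mathlib
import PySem

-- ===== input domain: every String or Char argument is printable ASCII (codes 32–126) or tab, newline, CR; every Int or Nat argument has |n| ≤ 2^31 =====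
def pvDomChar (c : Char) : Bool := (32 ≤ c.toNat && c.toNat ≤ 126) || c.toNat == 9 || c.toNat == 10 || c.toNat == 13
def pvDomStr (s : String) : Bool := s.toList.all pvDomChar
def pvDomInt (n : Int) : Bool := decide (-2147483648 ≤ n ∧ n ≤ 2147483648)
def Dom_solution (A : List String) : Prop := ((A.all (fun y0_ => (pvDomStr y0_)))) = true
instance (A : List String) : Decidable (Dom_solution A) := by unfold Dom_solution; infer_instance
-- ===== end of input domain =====

-- B replaces A's count-then-select design (count dict, then max over values, then filter-collect, then sort
-- and take first) by a single online pass keeping a running champion (best count, smallest suffix at it).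


-- ===== PORT A =====
def solution (A : List String) : String :=
  let reservations := A.foldl (fun d reserv =>
      if d.contains reserv then d.insert reserv (d.getD reserv 0 + 1)
      else d.insert reserv 1) (PySem.Dict.empty : PySem.Dict String Int)
  -- max() over the (empty) values raises ValueError when A = []: excluded by Pre_solution
  let maxRes := (PySem.List.max? reservations.values (fun x => x)).getD 0
  let listOfRooms := reservations.keys.foldl (fun acc room =>
      if reservations.getD room 0 == maxRes
      then acc ++ [PySem.Str.slice room (some 1) none] else acc) []
  let sortedRooms := PySem.List.sorted listOfRooms (fun x => x) false
  (PySem.List.pyGet? sortedRooms 0).getD ""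

-- ===== PORT B =====
-- the body of B's single loop: bump the room's count, and update the running champion
-- (best_count, best_suffix).  The `none => false` arm is Python's `s < None`: unreachable,
-- since best_suffix is None only while best_count = 0 < c.
def bStep (st : PySem.Dict String Int × Int × Option String) (r : String) :
    PySem.Dict String Int × Int × Option String :=
  let c := st.1.getD r 0 + 1
  let d := st.1.insert r c
  let s := PySem.Str.slice r (some 1) none
  if decide (st.2.1 < c) || (c == st.2.1 &&
      (match st.2.2 with | some bs => decide (s < bs) | none => false))
  then (d, c, some s)
  else (d, st.2.1, st.2.2)

def solution_alt (A : List String) : String :=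
  let st := A.foldl bStep ((PySem.Dict.empty : PySem.Dict String Int), 0, none)
  -- Python returns best_suffix, which is None only for A = [] (excluded by Pre_solution)
  match st.2.2 with
  | none => ""
  | some s => s

-- ===== PRECONDITION & SPEC =====
-- Pre_ excludes only A = [], on which A raises ValueError (max() of an empty sequence)
-- and B returns None, which is not a String.
def Pre_solution (A : List String) : Prop := A ≠ []
instance (A : List String) : Decidable (Pre_solution A) := by unfold Pre_solution; infer_instance
def pvWitness_solution : List String := ["0A", "1B", "0A"]

def Spec_solution (A : List String) (out : String) : Prop := out = solution_alt A
instance (A : List String) (out : String) : Decidable (Spec_solution A out) := by unfold Spec_solution; infer_instance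

-- ===== CLAIM (what is proved, stated in full; the proofs are below) =====
def Claim_equal_solution : Prop := ∀ (A : List String), Dom_solution A → Pre_solution A → Spec_solution A (solution A)

-- ===== LEMMAS AND PROOFS =====

-- the invariant of B's single pass: the dict is the counter of the processed prefix,
-- best_count bounds every count, and best_suffix is the smallest suffix among maximal-count rooms
def BInv (l : List String) (st : PySem.Dict String Int × Int × Option String) : Prop :=
  st.1 = PySem.Dict.counter l ∧
  (∀ k ∈ l, (l.count k : Int) ≤ st.2.1) ∧
  (match st.2.2 with
   | none => l = [] ∧ st.2.1 = 0
   | some s => (∃ k ∈ l, (l.count k : Int) = st.2.1 ∧ PySem.Str.slice k (some 1) none = s) ∧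
               (∀ k ∈ l, (l.count k : Int) = st.2.1 → s ≤ PySem.Str.slice k (some 1) none))

theorem counter_snoc (l : List String) (r : String) :
    (PySem.Dict.counter l).insert r ((PySem.Dict.counter l).getD r 0 + 1)
      = PySem.Dict.counter (l ++ [r]) := by
  rw [← PySem.Dict.foldl_insert_getD_add_one_eq_counter (l ++ [r]), List.foldl_append,
      PySem.Dict.foldl_insert_getD_add_one_eq_counter l]
  simp [List.foldl]

theorem count_snoc (l : List String) (r k : String) :
    ((l ++ [r]).count k : Int) = (l.count k : Int) + (if r = k then 1 else 0) := by
  by_cases h : r = k <;> simp [List.count_append, h]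

theorem inv_step (l : List String) (r : String)
    (st : PySem.Dict String Int × Int × Option String) (h : BInv l st) :
    BInv (l ++ [r]) (bStep st r) := by
  obtain ⟨hd, hub, hbs⟩ := h
  have hins : st.1.insert r (st.1.getD r 0 + 1) = PySem.Dict.counter (l ++ [r]) := by
    rw [hd]; exact counter_snoc l r
  have hcl : st.1.getD r 0 + 1 = (l.count r : Int) + 1 := by
    rw [hd, PySem.Dict.getD_counter]
  have hc : st.1.getD r 0 + 1 = ((l ++ [r]).count r : Int) := by
    rw [hcl, count_snoc]; simp
  have hother : ∀ k, r ≠ k → ((l ++ [r]).count k : Int) = (l.count k : Int) := by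
    intro k hk; rw [count_snoc]; simp [hk]
  have hmem : ∀ k, k ∈ l ++ [r] → k = r ∨ k ∈ l := by
    intro k hk; rcases List.mem_append.mp hk with h' | h'
    · exact Or.inr h'
    · exact Or.inl (List.mem_singleton.mp h')
  cases hb : st.2.2 with
  | none =>
    -- only before the first element: l = [], best_count = 0, and the branch is taken
    rw [hb] at hbs
    obtain ⟨rfl, hz⟩ := hbs
    simp only [bStep, hb, hz]
    have hc1 : st.1.getD r 0 + 1 = 1 := by simpa using hcl
    rw [hc1]
    simp only [List.nil_append, show (decide ((0:Int) < 1) || ((1:Int) == 0 && false)) = true from rfl,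
      if_true]
    refine ⟨by simpa [hz, hc1] using hins, ?_, ?_⟩
    · intro k hk
      rw [List.mem_singleton] at hk
      subst hk
      simp
    · refine ⟨⟨r, by simp, by simp, rfl⟩, ?_⟩
      intro k hk _
      rw [List.mem_singleton] at hk
      subst hk
      exact le_refl _
  | some b =>
    rw [hb] at hbs
    obtain ⟨⟨k0, hk0l, hk0c, hk0s⟩, hmin⟩ := hbs
    simp only [bStep, hb]
    split
    next hcond =>
      -- champion updated: new best count is c, new suffix is r[1:]
      simp only [Bool.or_eq_true, decide_eq_true_eq, Bool.and_eq_true, beq_iff_eq] at hcond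
      have hle' : st.2.1 ≤ st.1.getD r 0 + 1 := by
        rcases hcond with h1 | ⟨h1, _⟩
        · exact le_of_lt h1
        · exact le_of_eq h1.symm
      refine ⟨hins, ?_, ?_⟩
      · intro k hk
        rcases hmem k hk with rfl | hkl
        · rw [← hc]
        · by_cases hrk : r = k
          · subst hrk; rw [← hc]
          · rw [hother k hrk]; exact le_trans (hub k hkl) hle'
      · refine ⟨⟨r, by simp, hc.symm, rfl⟩, ?_⟩
        intro k hk hkc
        rcases hmem k hk with rfl | hkl
        · rfl
        · by_cases hrk : r = k
          · subst hrk; rfl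
          · rw [hother k hrk] at hkc
            rcases hcond with h1 | ⟨h1, h2⟩
            · exact absurd hkc (ne_of_lt (lt_of_le_of_lt (hub k hkl) h1))
            · exact le_trans (le_of_lt h2) (hmin k hkl (by rw [hkc, h1]))
    next hcond =>
      -- no update: c ≤ best_count and (in a tie) the suffix is not smaller
      simp only [Bool.or_eq_true, decide_eq_true_eq, Bool.and_eq_true, beq_iff_eq] at hcond
      push Not at hcond
      obtain ⟨hle, h2⟩ := hcond
      have hrk0 : r ≠ k0 := by
        intro hrk; rw [hcl, hrk, hk0c] at hle; omega
      refine ⟨hins, ?_, ?_⟩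
      · intro k hk
        rcases hmem k hk with rfl | hkl
        · rw [← hc]; exact hle
        · by_cases hrk : r = k
          · subst hrk; rw [← hc]; exact hle
          · rw [hother k hrk]; exact hub k hkl
      · refine ⟨⟨k0, by simp [hk0l], by rw [hother k0 hrk0]; exact hk0c, hk0s⟩, ?_⟩
        intro k hk hkc
        rcases hmem k hk with rfl | hkl
        · rw [← hc] at hkc
          exact le_of_not_gt (h2 hkc)
        · by_cases hrk : r = k
          · subst hrk
            rw [← hc] at hkc
            exact le_of_not_gt (h2 hkc)
          · rw [hother k hrk] at hkc
            exact hmin k hkl hkc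

theorem inv_fold (l : List String) :
    BInv l (l.foldl bStep ((PySem.Dict.empty : PySem.Dict String Int), 0, none)) := by
  induction l using List.reverseRecOn with
  | nil =>
    refine ⟨?_, by simp, by simp⟩
    simp [PySem.Dict.counter, List.foldl]
  | append_singleton l r ih =>
    rw [List.foldl_append]
    exact inv_step l r _ ih

-- A's contains-test counting loop builds the same dict as the Counter fold.
theorem counts_eq (A : List String) :
    A.foldl (fun d reserv => if d.contains reserv then d.insert reserv (d.getD reserv 0 + 1)
        else d.insert reserv 1) (PySem.Dict.empty : PySem.Dict String Int)
    = PySem.Dict.counter A := by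
  rw [PySem.List.foldl_congr_mem A _ (fun d r => d.insert r (d.getD r 0 + 1)) _ ?_]
  · exact PySem.Dict.foldl_insert_getD_add_one_eq_counter A
  · intro d r _
    by_cases hc : d.contains r
    · simp [hc]
    · simp only [Bool.not_eq_true] at hc
      simp [hc, PySem.Dict.getD_of_not_contains d 0 hc]

-- sorted(L)[0] = min(L) for nonempty L (no key): both are the minimal value.
theorem head_sorted_eq_min (L : List String) (hL : L ≠ []) (dflt : String) :
    (PySem.List.pyGet? (PySem.List.sorted L (fun x => x) false) 0).getD dflt
      = (PySem.List.min? L (fun x => x)).getD dflt := by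
  obtain ⟨h0, t, hs⟩ : ∃ h0 t, PySem.List.sorted L (fun x => x) false = h0 :: t := by
    cases hse : PySem.List.sorted L (fun x => x) false with
    | nil => exact absurd ((PySem.List.sorted_eq_nil_iff L (fun x => x) false).mp hse) hL
    | cons a b => exact ⟨a, b, rfl⟩
  have hmem : h0 ∈ L := by
    rw [← PySem.List.mem_sorted (key := fun x => x) (rev := false), hs]
    exact List.mem_cons_self ..
  have hmin : ∀ y ∈ L, h0 ≤ y := by
    intro y hy
    rw [← PySem.List.mem_sorted (key := fun x => x) (rev := false)] at hy
    obtain ⟨q, hq, rfl⟩ := List.mem_iff_getElem.mp hy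
    have := PySem.List.sorted_id_getElem_mono (xs := L) (p := 0) (q := q) (Nat.zero_le _) hq
    simpa [hs] using this
  cases hv : PySem.List.min? L (fun x => x) with
  | none => exact absurd ((PySem.List.min?_eq_none_iff L (fun x => x)).mp hv) hL
  | some v =>
    have hvm := PySem.List.min?_mem hv
    have h1 : v ≤ h0 := PySem.List.min?_isMin hv h0 hmem
    have h2 : h0 ≤ v := hmin v hvm
    rw [hs]
    simp [PySem.List.pyGet?, PySem.List.pyIdx?, le_antisymm h1 h2]

-- A, reduced: the minimal suffix among maximal-count rooms.
theorem solution_eq_min (A : List String) (hpre : A ≠ []) :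
    solution A = (PySem.List.min?
      (((PySem.Dict.counter A).keys.filter (fun k => (PySem.Dict.counter A).getD k 0 ==
          (PySem.List.max? (PySem.Dict.counter A).values (fun x => x)).getD 0)).map
        (fun k => PySem.Str.slice k (some 1) none)) (fun x => x)).getD "" := by
  unfold solution
  rw [counts_eq]
  set C := PySem.Dict.counter A with hC
  set M := (PySem.List.max? C.values (fun x => x)).getD 0 with hM
  have hnd : C.keys.Nodup := PySem.Dict.nodup_keys_counter A
  have hfold := PySem.List.foldl_append_if (fun room => C.getD room 0 == M)
      (fun room => PySem.Str.slice room (some 1) none) C.keys ([] : List String)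
  show (PySem.List.pyGet? (PySem.List.sorted
      (List.foldl (fun acc room => if (C.getD room 0 == M) = true
        then acc ++ [PySem.Str.slice room (some 1) none] else acc) [] C.keys)
      (fun x => x) false) 0).getD "" = _
  rw [hfold, List.nil_append]
  apply head_sorted_eq_min
  -- the filtered list is nonempty: some key attains the maximum of the values
  have hkeys_ne : C.keys ≠ [] := by
    rw [hC, PySem.Dict.keys_counter]
    cases A with
    | nil => exact absurd rfl hpre
    | cons a t =>
      intro hnil
      have : a ∈ PySem.Set.ofList (a :: t) := (PySem.Set.mem_ofList _ _).mpr (List.mem_cons_self ..)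
      rw [hnil] at this
      exact absurd this List.not_mem_nil
  have hvals_ne : C.values ≠ [] := by
    intro h
    have := PySem.Dict.values_eq_map_keys C hnd 0
    rw [h] at this
    exact hkeys_ne (List.map_eq_nil_iff.mp this.symm)
  cases hm : PySem.List.max? C.values (fun x => x) with
  | none => exact absurd ((PySem.List.max?_eq_none_iff C.values (fun x => x)).mp hm) hvals_ne
  | some m =>
    have hmem := PySem.List.max?_mem hm
    rw [PySem.Dict.values_eq_map_keys C hnd 0] at hmem
    obtain ⟨k, hk, hkm⟩ := List.mem_map.mp hmem
    intro h
    have : k ∈ C.keys.filter (fun k => C.getD k 0 == M) :=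
      List.mem_filter.mpr ⟨hk, by simp [hkm, hM, hm]⟩
    rw [List.map_eq_nil_iff.mp h] at this
    exact absurd this List.not_mem_nil

theorem solution_eq_alt (A : List String) (hpre : A ≠ []) : solution A = solution_alt A := by
  have hinv := inv_fold A
  obtain ⟨hd, hub, hbs⟩ := hinv
  set st := A.foldl bStep ((PySem.Dict.empty : PySem.Dict String Int), 0, none) with hst
  cases hb : st.2.2 with
  | none => rw [hb] at hbs; exact absurd hbs.1 hpre
  | some s =>
    rw [hb] at hbs
    obtain ⟨⟨k0, hk0l, hk0c, hk0s⟩, hmin⟩ := hbs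
    have halt : solution_alt A = s := by
      show (match st.2.2 with | none => "" | some s => s) = s
      rw [hb]
    rw [halt, solution_eq_min A hpre]
    set C := PySem.Dict.counter A with hC
    have hnd : C.keys.Nodup := PySem.Dict.nodup_keys_counter A
    have hmemk : ∀ k, k ∈ C.keys ↔ k ∈ A := by
      intro k; rw [hC, PySem.Dict.keys_counter, PySem.Set.mem_ofList]
    have hgetD : ∀ k, C.getD k 0 = (A.count k : Int) := by
      intro k; rw [hC, PySem.Dict.getD_counter]
    -- (a) the running best_count is exactly max(values)
    have hmax : PySem.List.max? C.values (fun x => x) = some st.2.1 := by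
      have hbc_mem : st.2.1 ∈ C.values := by
        rw [PySem.Dict.values_eq_map_keys C hnd 0]
        exact List.mem_map.mpr ⟨k0, (hmemk k0).mpr hk0l, by rw [hgetD, hk0c]⟩
      cases hm : PySem.List.max? C.values (fun x => x) with
      | none =>
        rw [PySem.List.max?_eq_none_iff] at hm
        rw [hm] at hbc_mem
        exact absurd hbc_mem List.not_mem_nil
      | some m =>
        have h1 : st.2.1 ≤ m := PySem.List.max?_isMax hm st.2.1 hbc_mem
        have hmm := PySem.List.max?_mem hm
        rw [PySem.Dict.values_eq_map_keys C hnd 0] at hmm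
        obtain ⟨k, hk, hkm⟩ := List.mem_map.mp hmm
        have h2 : m ≤ st.2.1 := by
          rw [← hkm, hgetD]
          exact hub k ((hmemk k).mp hk)
        rw [le_antisymm h1 h2]
    rw [hmax]
    simp only [Option.getD_some]
    -- (b) the min of the suffixes of the maximal-count rooms is the running champion s
    set L := (C.keys.filter (fun k => C.getD k 0 == st.2.1)).map
        (fun k => PySem.Str.slice k (some 1) none) with hL
    have hsL : s ∈ L := by
      rw [hL]
      exact List.mem_map.mpr ⟨k0,
        List.mem_filter.mpr ⟨(hmemk k0).mpr hk0l, by rw [hgetD, hk0c]; simp⟩, hk0s⟩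
    cases hv : PySem.List.min? L (fun x => x) with
    | none =>
      rw [PySem.List.min?_eq_none_iff] at hv
      rw [hv] at hsL
      exact absurd hsL List.not_mem_nil
    | some v =>
      have h1 : v ≤ s := PySem.List.min?_isMin hv s hsL
      have hvm := PySem.List.min?_mem hv
      rw [hL] at hvm
      obtain ⟨k, hk, hkv⟩ := List.mem_map.mp hvm
      obtain ⟨hkk, hkc⟩ := List.mem_filter.mp hk
      have h2 : s ≤ v := by
        rw [← hkv]
        apply hmin k ((hmemk k).mp hkk)
        rw [← hgetD]
        exact (beq_iff_eq.mp hkc)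
      simp [le_antisymm h1 h2]

-- ===== VERDICT (by name: the statement is the Claim_ definition above) =====
theorem solution_spec : Claim_equal_solution := by
  intro A _ hpre
  unfold Spec_solution
  exact solution_eq_alt A hpre
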